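-- pv_equiv track=rewrite | github.com/4sgupta828/doky | utils/content_trimmer.py | _looks_like_code
-- ===== SOURCE A (Python) =====
-- def _looks_like_code(text: str) -> bool:
--     """Heuristic to detect if text looks like code."""
--     code_indicators = [
--         'def ', 'class ', 'import ', 'from ',  # Python
--         'function ', 'const ', 'let ', 'var ',  # JavaScript
--         'public class', 'private ', 'package ',  # Java
--         '#include', 'int main', 'void ',  # C/C++
--         '#!/bin/', '#!/usr/bin/'  # Scripts
--     ]
--
--     text_lower = text.lower()
--     return any(indicator in text_lower for indicator in code_indicators)
-- ===== SOURCE B (Python) =====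
-- def _looks_like_code(text: str) -> bool:
--     """Heuristic to detect if text looks like code."""
--     code_indicators = (
--         'def ', 'class ', 'import ', 'from ',
--         'function ', 'const ', 'let ', 'var ',
--         'public class', 'private ', 'package ',
--         '#include', 'int main', 'void ',
--         '#!/bin/', '#!/usr/bin/'
--     )
--     t = text.lower()
--     # single left-to-right pass: at each position test all indicators as prefixes
--     for i in range(len(t)):
--         if t.startswith(code_indicators, i):
--             return True
--     return False
-- ===== Notes on version B (the rewrite author's own statement) =====
-- stated objective: alternative
-- what changed: B replaces the per-indicator independent substring scans by one left-to-right pass over the lowered text that tests all indicators as prefixes at each position (str.startswith with a tuple at an offset).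
import Mathlib
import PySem

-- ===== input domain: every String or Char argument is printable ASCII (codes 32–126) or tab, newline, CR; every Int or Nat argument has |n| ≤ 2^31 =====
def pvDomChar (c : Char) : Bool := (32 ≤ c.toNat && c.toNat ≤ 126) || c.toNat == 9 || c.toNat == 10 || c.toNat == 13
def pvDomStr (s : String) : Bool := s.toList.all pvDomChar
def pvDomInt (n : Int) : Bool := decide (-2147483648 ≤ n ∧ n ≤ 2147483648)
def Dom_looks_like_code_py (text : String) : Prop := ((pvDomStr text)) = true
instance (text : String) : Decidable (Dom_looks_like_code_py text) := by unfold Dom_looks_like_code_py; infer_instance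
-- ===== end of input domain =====

-- B does one left-to-right pass over the lowered text, testing all indicators as
-- prefixes at each position, instead of A's k independent substring scans.

-- ===== PORT A =====
def pvIndicators : List String :=
  ["def ", "class ", "import ", "from ",
   "function ", "const ", "let ", "var ",
   "public class", "private ", "package ",
   "#include", "int main", "void ",
   "#!/bin/", "#!/usr/bin/"]

def looks_like_code_py (text : String) : Bool :=
  let text_lower := PySem.Str.lower text
  pvIndicators.any (fun indicator => PySem.Str.isIn indicator text_lower)

-- ===== PORT B =====
-- the same indicators, as char lists (B works on the lowered character sequence)
def pvIndicatorsB : List (List Char) := pvIndicators.map String.toList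

-- the loop 'for i in range(len(t)): if t.startswith(code_indicators, i): return True'
-- as structural recursion over the successive suffixes of t
def pvScanB (l : List Char) : Bool :=
  match l with
  | [] => false
  | c :: cs => if pvIndicatorsB.any (fun ind => PySem.Chars.startswith (c :: cs) ind) then true
               else pvScanB cs

def looks_like_code_py_alt (text : String) : Bool :=
  pvScanB (PySem.Chars.lower text.toList)

-- ===== PRECONDITION & SPEC =====
def Spec_looks_like_code_py (text : String) (out : Bool) : Prop := out = looks_like_code_py_alt text
instance (text : String) (out : Bool) : Decidable (Spec_looks_like_code_py text out) := by unfold Spec_looks_like_code_py; infer_instance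

-- ===== CLAIM (what is proved, stated in full; the proofs are below) =====
def Claim_equal_looks_like_code_py : Prop := ∀ (text : String), Dom_looks_like_code_py text → Spec_looks_like_code_py text (looks_like_code_py text)

-- ===== LEMMAS AND PROOFS =====

theorem pvScanB_iff (l : List Char) :
    pvScanB l = true ↔ ∃ ind ∈ pvIndicatorsB, ind <:+: l := by
  induction l with
  | nil =>
    simp only [pvScanB, List.infix_nil]
    constructor
    · intro h; exact absurd h (by decide)
    · rintro ⟨ind, hmem, rfl⟩; revert hmem; decide
  | cons c cs ih =>
    simp only [pvScanB]
    split_ifs with h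
    · simp only [true_iff]
      rw [List.any_eq_true] at h
      obtain ⟨ind, hmem, hpre⟩ := h
      exact ⟨ind, hmem, ((PySem.Chars.startswith_iff _ _).mp hpre).isInfix⟩
    · rw [ih]
      rw [Bool.not_eq_true, List.any_eq_false] at h
      constructor
      · rintro ⟨ind, hmem, hinf⟩; exact ⟨ind, hmem, List.infix_cons hinf⟩
      · rintro ⟨ind, hmem, hinf⟩
        rcases (List.infix_cons_iff).mp hinf with hp | hi
        · exact absurd ((PySem.Chars.startswith_iff _ _).mpr hp) (by simpa using h ind hmem)
        · exact ⟨ind, hmem, hi⟩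

theorem looks_like_code_py_spec : Claim_equal_looks_like_code_py := by
  intro text _
  unfold Spec_looks_like_code_py looks_like_code_py looks_like_code_py_alt
  rw [Bool.eq_iff_iff, List.any_eq_true, pvScanB_iff]
  constructor
  · rintro ⟨ind, hmem, hIn⟩
    refine ⟨ind.toList, List.mem_map_of_mem hmem, ?_⟩
    have := (PySem.Chars.isIn_iff_infix (sub := ind.toList) (s := (PySem.Str.lower text).toList)).mp
      (by simpa [PySem.Str.isIn] using hIn)
    simpa [PySem.Str.toList_lower] using this
  · rintro ⟨ind, hmem, hinf⟩
    obtain ⟨s, hs, rfl⟩ := List.mem_map.mp hmem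
    refine ⟨s, hs, ?_⟩
    have := (PySem.Chars.isIn_iff_infix (sub := s.toList)
      (s := PySem.Chars.lower text.toList)).mpr hinf
    simpa [PySem.Str.isIn, PySem.Str.toList_lower] using this
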